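-- pv_equiv track=rewrite | github.com/HuxleyBerry/advent-of-code | day7/p2.py | count_distinct_cards_in_hand
-- ===== SOURCE A (Python) =====
-- def count_distinct_cards_in_hand(hand):
--     occur = set()
--     occur_twice = set()
--     for h in hand:
--         if h != "J":
--             if h in occur:
--                 occur_twice.add(h)
--             occur.add(h)
--     return len(occur), len(occur_twice)
-- ===== SOURCE B (Python) =====
-- def count_distinct_cards_in_hand(hand):
--     counts = {}
--     for h in hand:
--         if h != "J":
--             counts[h] = counts.get(h, 0) + 1
--     repeated = 0
--     for v in counts.values():
--         if v >= 2:
--             repeated += 1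
--     return len(counts), repeated
-- ===== Notes on version B (the rewrite author's own statement) =====
-- stated objective: alternative
-- what changed: B builds one frequency table of the non-J cards in a single counting pass and then derives both answers from it (table size, and a scan of the values for counts >= 2), instead of A's incremental maintenance of two sets with a membership branch per card.
import Mathlib
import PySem

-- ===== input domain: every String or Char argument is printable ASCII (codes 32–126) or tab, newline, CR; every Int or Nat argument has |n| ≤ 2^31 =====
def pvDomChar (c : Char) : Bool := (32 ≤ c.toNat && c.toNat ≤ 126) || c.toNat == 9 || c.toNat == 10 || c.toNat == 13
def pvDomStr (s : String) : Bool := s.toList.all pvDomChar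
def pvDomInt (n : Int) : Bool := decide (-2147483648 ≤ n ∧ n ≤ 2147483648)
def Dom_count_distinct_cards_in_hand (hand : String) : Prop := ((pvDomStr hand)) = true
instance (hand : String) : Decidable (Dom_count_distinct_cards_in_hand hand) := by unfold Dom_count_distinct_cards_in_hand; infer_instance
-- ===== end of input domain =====

-- B replaces A's incremental two-set maintenance by one counting pass into a frequency
-- table followed by a scan of its values; same cost, different structure (objective: alternative).


-- ===== PORT A =====
def count_distinct_cards_in_hand (hand : String) : Int × Int :=
  let st := hand.toList.foldl
    (fun (s : PySem.Set Char × PySem.Set Char) h =>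
      if h ≠ 'J' then
        (PySem.Set.add s.1 h, if s.1.contains h then PySem.Set.add s.2 h else s.2)
      else s)
    (PySem.Set.empty, PySem.Set.empty)
  (PySem.Set.len st.1, PySem.Set.len st.2)

-- ===== PORT B =====
def count_distinct_cards_in_hand_alt (hand : String) : Int × Int :=
  let counts := hand.toList.foldl
    (fun (d : PySem.Dict Char Int) h =>
      if h ≠ 'J' then d.insert h (d.getD h 0 + 1) else d)
    PySem.Dict.empty
  let repeated := counts.values.foldl (fun acc v => if v ≥ 2 then acc + 1 else acc) (0 : Int)
  ((counts.size : Int), repeated)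

-- ===== PRECONDITION & SPEC =====
def Spec_count_distinct_cards_in_hand (hand : String) (out : Int × Int) : Prop := out = count_distinct_cards_in_hand_alt hand
instance (hand : String) (out : Int × Int) : Decidable (Spec_count_distinct_cards_in_hand hand out) := by unfold Spec_count_distinct_cards_in_hand; infer_instance

-- ===== CLAIM (what is proved, stated in full; the proofs are below) =====
def Claim_equal_count_distinct_cards_in_hand : Prop := ∀ (hand : String), Dom_count_distinct_cards_in_hand hand → Spec_count_distinct_cards_in_hand hand (count_distinct_cards_in_hand hand)

-- ===== LEMMAS AND PROOFS =====

-- Invariant of the two loops over the same (already J-filtered) card list: A's `occur`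
-- is exactly the key list of B's table, A's `occur_twice` is nodup and holds exactly
-- the keys whose count reached 2, and every stored count of a present key is >= 1.
theorem pv_inv (l : List Char) (s1 s2 : PySem.Set Char) (d : PySem.Dict Char Int)
    (hkeys : d.keys = s1) (hnd : d.keys.Nodup) (hnd2 : s2.Nodup)
    (htw : ∀ c, c ∈ s2 ↔ d.getD c 0 ≥ 2)
    (hpos : ∀ c ∈ d.keys, 1 ≤ d.getD c 0) :
    let st := l.foldl (fun (s : PySem.Set Char × PySem.Set Char) h =>
      (PySem.Set.add s.1 h, if s.1.contains h then PySem.Set.add s.2 h else s.2)) (s1, s2)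
    let d' := l.foldl (fun (d : PySem.Dict Char Int) h => d.insert h (d.getD h 0 + 1)) d
    d'.keys = st.1 ∧ d'.keys.Nodup ∧ st.2.Nodup ∧
      (∀ c, c ∈ st.2 ↔ d'.getD c 0 ≥ 2) ∧ (∀ c ∈ d'.keys, 1 ≤ d'.getD c 0) := by
  induction l generalizing s1 s2 d with
  | nil => exact ⟨hkeys, hnd, hnd2, htw, hpos⟩
  | cons x t ih =>
    simp only [List.foldl_cons]
    by_cases hc : d.contains x = true
    · -- x already present: occur unchanged, occur_twice gains x, count bumps to ≥ 2
      have hxk : x ∈ d.keys := (PySem.Dict.contains_iff_mem_keys d x).mp hc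
      have hx1 : x ∈ s1 := hkeys ▸ hxk
      have hcs : s1.contains x = true := (PySem.Set.contains_iff s1 x).mpr hx1
      have hadd1 : PySem.Set.add s1 x = s1 := by simp [PySem.Set.add, hx1]
      rw [hcs, if_pos rfl, hadd1]
      apply ih
      · rw [PySem.Dict.keys_insert_of_contains d _ hc, hkeys]
      · rw [PySem.Dict.keys_insert_of_contains d _ hc]; exact hnd
      · exact PySem.Set.nodup_add s2 x hnd2
      · intro c
        rcases eq_or_ne c x with rfl | hne
        · rw [PySem.Dict.getD_insert_self]
          constructor
          · intro _
            have := hpos c hxk; omega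
          · intro _
            exact (PySem.Set.mem_add s2 c c).mpr (Or.inr rfl)
        · rw [PySem.Set.mem_add, PySem.Dict.getD_insert_of_ne d _ _ hne]
          constructor
          · rintro (h | rfl)
            · exact (htw c).mp h
            · exact absurd rfl hne
          · intro h; exact Or.inl ((htw c).mpr h)
      · intro c hck
        rcases eq_or_ne c x with rfl | hne
        · rw [PySem.Dict.getD_insert_self]
          have := hpos c hxk; omega
        · rw [PySem.Dict.getD_insert_of_ne d _ _ hne]
          apply hpos
          rw [PySem.Dict.keys_insert_of_contains d _ hc] at hck; exact hck
    · -- x fresh: appended to occur and to the table with count 1; occur_twice unchanged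
      have hc' : d.contains x = false := by simpa using hc
      have hxk : x ∉ d.keys := fun hm => hc ((PySem.Dict.contains_iff_mem_keys d x).mpr hm)
      have hx1 : x ∉ s1 := hkeys ▸ hxk
      have hcs : s1.contains x = false := by
        by_contra hcc
        exact hx1 ((PySem.Set.contains_iff s1 x).mp (by simpa using hcc))
      have hd0 : d.getD x 0 = 0 := PySem.Dict.getD_of_not_contains d 0 hc'
      rw [hcs]
      simp only [Bool.false_eq_true, if_false]
      apply ih
      · rw [PySem.Dict.keys_insert_of_not_contains d _ hc', hkeys]
        simp [PySem.Set.add, hx1]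
      · exact PySem.Dict.nodup_keys_insert d x _ hnd
      · exact hnd2
      · intro c
        rcases eq_or_ne c x with rfl | hne
        · rw [PySem.Dict.getD_insert_self, hd0]
          constructor
          · intro h
            have := (htw c).mp h; omega
          · intro h; omega
        · rw [PySem.Dict.getD_insert_of_ne d _ _ hne]; exact htw c
      · intro c hck
        rcases eq_or_ne c x with rfl | hne
        · rw [PySem.Dict.getD_insert_self, hd0]; omega
        · rw [PySem.Dict.getD_insert_of_ne d _ _ hne]
          apply hpos
          rw [PySem.Dict.keys_insert_of_not_contains d _ hc'] at hck
          rcases List.mem_append.mp hck with h | h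
          · exact h
          · simp at h; exact absurd h hne

-- ===== VERDICT (by name: the statement is the Claim_ definition above) =====
theorem count_distinct_cards_in_hand_spec : Claim_equal_count_distinct_cards_in_hand := by
  intro hand _
  unfold Spec_count_distinct_cards_in_hand count_distinct_cards_in_hand count_distinct_cards_in_hand_alt
  simp only [PySem.List.foldl_ite_eq_foldl_filter]
  set l := hand.toList.filter (fun x => decide (x ≠ 'J')) with hl
  obtain ⟨hkeys, hnd, hnd2, htw, hpos⟩ :=
    pv_inv l PySem.Set.empty PySem.Set.empty PySem.Dict.empty rfl (by simp) (by simp)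
      (by intro c; simp [PySem.Set.empty]) (by simp)
  set st := l.foldl (fun (s : PySem.Set Char × PySem.Set Char) h =>
      (PySem.Set.add s.1 h, if s.1.contains h then PySem.Set.add s.2 h else s.2))
      (PySem.Set.empty, PySem.Set.empty) with hst
  set d := l.foldl (fun (d : PySem.Dict Char Int) h => d.insert h (d.getD h 0 + 1))
      PySem.Dict.empty with hd
  have hfst : (PySem.Set.len st.1 : Int) = (d.size : Int) := by
    have : d.size = d.keys.length := by
      simp [PySem.Dict.size, PySem.Dict.keys]
    rw [this, hkeys]; rfl
  have hlen : ∀ (xs : List Int), xs.foldl (fun acc _ => acc + 1) (0 : Int) = xs.length := by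
    intro xs
    rw [PySem.List.foldl_add (g := fun _ => (1 : Int))]
    simp
  have hsnd : (PySem.Set.len st.2 : Int) =
      (d.values.filter (fun x => decide (x ≥ 2))).foldl (fun acc _ => acc + 1) (0 : Int) := by
    rw [hlen]
    have hv : d.values = d.keys.map (fun k => d.getD k 0) := PySem.Dict.values_eq_map_keys d hnd 0
    have hcount : (d.values.filter (fun x => decide (x ≥ 2))).length =
        (d.keys.filter (fun k => decide (d.getD k 0 ≥ 2))).length := by
      rw [hv, List.filter_map, List.length_map]; rfl
    have hperm : st.2.Perm (d.keys.filter (fun k => decide (d.getD k 0 ≥ 2))) := by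
      rw [List.perm_ext_iff_of_nodup hnd2 (hnd.filter _)]
      intro c
      rw [List.mem_filter]
      constructor
      · intro h
        have h2 := (htw c).mp h
        refine ⟨?_, by simpa using h2⟩
        by_contra hck
        have hcf : d.contains c = false := by
          by_contra hcc
          exact hck ((PySem.Dict.contains_iff_mem_keys d c).mp (by simpa using hcc))
        rw [PySem.Dict.getD_of_not_contains d 0 hcf] at h2; omega
      · rintro ⟨_, h⟩
        exact (htw c).mpr (by simpa using h)
    rw [hcount, ← hperm.length_eq]
    simp [PySem.Set.len]
  rw [Prod.ext_iff]
  exact ⟨hfst, hsnd⟩
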